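-- pv_equiv track=rewrite | github.com/pypi-data/pypi-mirror-400 | packages/agent-supervisor-memory/agent_supervisor_memory-0.2.35.tar.gz/agent_supervisor_memory-0.2.35/src/agent_supervisor_memory/tools/projects.py | _locks_conflict
-- ===== SOURCE A (Python) =====
-- def _locks_conflict(a: list[str], b: list[str]) -> bool:
--     if not a or not b:
--         return False
--     for x in a:
--         for y in b:
--             if not x or not y:
--                 continue
--             if x == y or x.startswith(y + "/") or y.startswith(x + "/"):
--                 return True
--     return False
-- ===== SOURCE B (Python) =====
-- def _covers(paths, others):
--     # True iff some path in `paths` equals, or lies strictly below, a path in `others`.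
--     for p in paths:
--         if p in others:
--             return True
--         for i, ch in enumerate(p):
--             if ch == "/" and p[:i] in others:
--                 return True
--     return False
--
--
-- def _locks_conflict(a: list[str], b: list[str]) -> bool:
--     sa = {x for x in a if x}
--     sb = {y for y in b if y}
--     return _covers(sa, sb) or _covers(sb, sa)
-- ===== Notes on version B (the rewrite author's own statement) =====
-- stated objective: alternative
-- what changed: Replaced the all-pairs startswith scan by two hash sets of the (nonempty) paths: each path is checked by looking up itself and each of its '/'-cut ancestor prefixes in the other side's set, in both directions.
import Mathlib
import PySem

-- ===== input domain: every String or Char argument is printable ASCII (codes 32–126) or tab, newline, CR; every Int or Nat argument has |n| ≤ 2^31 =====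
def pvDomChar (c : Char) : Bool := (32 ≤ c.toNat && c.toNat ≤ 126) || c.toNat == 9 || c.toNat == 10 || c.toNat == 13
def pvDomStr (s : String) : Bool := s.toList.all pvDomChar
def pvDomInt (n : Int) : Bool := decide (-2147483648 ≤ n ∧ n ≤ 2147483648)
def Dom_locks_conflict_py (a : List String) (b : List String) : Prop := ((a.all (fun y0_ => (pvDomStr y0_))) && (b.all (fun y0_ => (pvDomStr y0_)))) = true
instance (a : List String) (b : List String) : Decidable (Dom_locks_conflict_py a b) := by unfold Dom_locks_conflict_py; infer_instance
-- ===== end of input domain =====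

-- B replaces A's all-pairs startswith scan by two hash sets of the nonempty paths, looking up each
-- path and its '/'-cut ancestor prefixes in the other side's set.

-- ===== PORT A =====
-- Literal port of A: the nested for-loops with early `return True` are `any`/`any`, `continue` is
-- `false`, truthiness `not x` is the emptiness test, and `y + "/"` is code-point append (exact).
def locks_conflict_py (a : List String) (b : List String) : Bool :=
  if a.isEmpty || b.isEmpty then false
  else
    a.any (fun x =>
      b.any (fun y =>
        if x.toList.isEmpty || y.toList.isEmpty then false
        else x == y || PySem.Chars.startswith x.toList (y.toList ++ ['/'])
                    || PySem.Chars.startswith y.toList (x.toList ++ ['/'])))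

-- ===== PORT B =====
-- Port of Source B's `_covers`: for each path of the set `paths`, look up the path itself and each
-- slice p[:i] with p[i] == '/' in the set `others` (strings handled as their code-point lists).
def pvCovers (paths others : PySem.Set (List Char)) : Bool :=
  paths.any (fun p =>
    PySem.Set.contains others p ||
    (PySem.List.enumerate p).any (fun ic =>
      ic.2 == '/' && PySem.Set.contains others (PySem.List.slice p none (some ic.1))))

-- Port of Source B's `_locks_conflict`: the two set comprehensions, then `_covers` both ways.
def locks_conflict_py_alt (a : List String) (b : List String) : Bool :=
  let sa : PySem.Set (List Char) :=
    PySem.Set.ofList ((a.map String.toList).filter (fun p => !p.isEmpty))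
  let sb : PySem.Set (List Char) :=
    PySem.Set.ofList ((b.map String.toList).filter (fun p => !p.isEmpty))
  pvCovers sa sb || pvCovers sb sa

-- ===== PRECONDITION & SPEC =====
def Spec_locks_conflict_py (a : List String) (b : List String) (out : Bool) : Prop := out = locks_conflict_py_alt a b
instance (a : List String) (b : List String) (out : Bool) : Decidable (Spec_locks_conflict_py a b out) := by unfold Spec_locks_conflict_py; infer_instance

-- ===== CLAIM (what is proved, stated in full; the proofs are below) =====
def Claim_equal_locks_conflict_py : Prop := ∀ (a : List String) (b : List String), Dom_locks_conflict_py a b → Spec_locks_conflict_py a b (locks_conflict_py a b)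

-- ===== LEMMAS AND PROOFS =====

-- the conflict relation both programs decide, on code-point lists
def pvConf (xs ys : List Char) : Prop :=
  xs = ys ∨ (ys ++ ['/']) <+: xs ∨ (xs ++ ['/']) <+: ys

-- "q + '/' is a prefix of p" ⟺ "q is the cut of p at some '/'"
lemma pvAnc_iff (p q : List Char) :
    (q ++ ['/']) <+: p ↔ ∃ i : Nat, ∃ _ : i < p.length, p[i] = '/' ∧ p.take i = q := by
  constructor
  · rintro ⟨t, ht⟩
    rw [List.append_assoc] at ht
    subst ht
    refine ⟨q.length, by simp, ?_, ?_⟩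
    · exact List.getElem_of_append rfl rfl
    · exact List.take_left
  · rintro ⟨i, h, hc, ht⟩
    have h1 : p.take (i + 1) = q ++ ['/'] := by
      rw [List.take_add_one, ht, List.getElem?_eq_getElem h, hc]
      rfl
    exact h1 ▸ List.take_prefix (i + 1) p

lemma pvAncMem_iff (p : List Char) (os : List (List Char)) :
    (∃ q ∈ os, (q ++ ['/']) <+: p) ↔
    ∃ i : Nat, ∃ _ : i < p.length, p[i] = '/' ∧ p.take i ∈ os := by
  constructor
  · rintro ⟨q, hq, hpre⟩
    rcases (pvAnc_iff p q).1 hpre with ⟨i, h, hc, ht⟩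
    exact ⟨i, h, hc, ht ▸ hq⟩
  · rintro ⟨i, h, hc, ht⟩
    exact ⟨_, ht, (pvAnc_iff p _).2 ⟨i, h, hc, rfl⟩⟩

lemma pvCovers_iff (ps os : List (List Char)) :
    pvCovers (PySem.Set.ofList ps) (PySem.Set.ofList os) = true ↔
    ∃ p ∈ ps, p ∈ os ∨ ∃ q ∈ os, (q ++ ['/']) <+: p := by
  unfold pvCovers
  simp only [List.any_eq_true, PySem.Set.contains_iff, PySem.Set.mem_ofList, Bool.or_eq_true,
    Bool.and_eq_true, beq_iff_eq, PySem.List.mem_enumerate_iff]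
  refine exists_congr fun p => and_congr_right fun _ => or_congr Iff.rfl ?_
  rw [pvAncMem_iff]
  constructor
  · rintro ⟨ic, ⟨k, hk, rfl⟩, hc, hm⟩
    dsimp only at hc hm
    refine ⟨k, hk, hc, ?_⟩
    rw [zero_add] at hm
    rwa [PySem.List.slice_to_natCast] at hm
  · rintro ⟨i, h, hc, ht⟩
    refine ⟨((0 : Int) + i, p[i]), ⟨i, h, rfl⟩, hc, ?_⟩
    dsimp only
    rw [zero_add]
    rwa [PySem.List.slice_to_natCast]

lemma pvMemFiltered (l : List String) (p : List Char) :
    p ∈ (l.map String.toList).filter (fun q => !q.isEmpty) ↔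
    p ≠ [] ∧ ∃ x ∈ l, x.toList = p := by
  simp only [List.mem_filter, List.mem_map, Bool.not_eq_eq_eq_not, Bool.not_true,
    List.isEmpty_eq_false_iff, ne_eq]
  tauto

lemma pvA_iff (a b : List String) :
    locks_conflict_py a b = true ↔
    ∃ x ∈ a, ∃ y ∈ b, x.toList ≠ [] ∧ y.toList ≠ [] ∧ pvConf x.toList y.toList := by
  unfold locks_conflict_py
  split_ifs with h
  · simp only [Bool.or_eq_true, List.isEmpty_iff] at h
    refine iff_of_false (by simp) ?_
    rintro ⟨x, hx, y, hy, -⟩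
    rcases h with h | h <;> subst h <;> simp_all
  · simp only [List.any_eq_true]
    refine exists_congr fun x => and_congr_right fun _ =>
      exists_congr fun y => and_congr_right fun _ => ?_
    split_ifs with hxy
    · simp only [Bool.or_eq_true, List.isEmpty_iff] at hxy
      refine iff_of_false (by simp) ?_
      rintro ⟨hxe, hye, -⟩
      tauto
    · simp only [Bool.or_eq_true, List.isEmpty_iff, not_or] at hxy
      simp only [Bool.or_eq_true, beq_iff_eq, PySem.Chars.startswith_iff, pvConf,
        ← String.toList_inj]
      tauto

lemma pvB_iff (a b : List String) :
    locks_conflict_py_alt a b = true ↔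
    ∃ x ∈ a, ∃ y ∈ b, x.toList ≠ [] ∧ y.toList ≠ [] ∧ pvConf x.toList y.toList := by
  show (pvCovers _ _ || pvCovers _ _) = true ↔ _
  simp only [Bool.or_eq_true, pvCovers_iff]
  constructor
  · rintro (⟨p, hp, hcase⟩ | ⟨p, hp, hcase⟩)
    · rcases (pvMemFiltered a p).1 hp with ⟨hpe, x, hx, hxt⟩
      rcases hcase with hm | ⟨q, hq, hanc⟩
      · rcases (pvMemFiltered b p).1 hm with ⟨-, y, hy, hyt⟩
        exact ⟨x, hx, y, hy, hxt ▸ hpe, hyt ▸ hpe, Or.inl (by rw [hxt, hyt])⟩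
      · rcases (pvMemFiltered b q).1 hq with ⟨hqe, y, hy, hyt⟩
        exact ⟨x, hx, y, hy, hxt ▸ hpe, hyt ▸ hqe, Or.inr (Or.inl (by rw [hxt, hyt]; exact hanc))⟩
    · rcases (pvMemFiltered b p).1 hp with ⟨hpe, y, hy, hyt⟩
      rcases hcase with hm | ⟨q, hq, hanc⟩
      · rcases (pvMemFiltered a p).1 hm with ⟨-, x, hx, hxt⟩
        exact ⟨x, hx, y, hy, hxt ▸ hpe, hyt ▸ hpe, Or.inl (by rw [hxt, hyt])⟩
      · rcases (pvMemFiltered a q).1 hq with ⟨hqe, x, hx, hxt⟩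
        exact ⟨x, hx, y, hy, hxt ▸ hqe, hyt ▸ hpe, Or.inr (Or.inr (by rw [hxt, hyt]; exact hanc))⟩
  · rintro ⟨x, hx, y, hy, hxe, hye, (h | h | h)⟩
    · exact Or.inl ⟨x.toList, (pvMemFiltered a _).2 ⟨hxe, x, hx, rfl⟩,
        Or.inl ((pvMemFiltered b _).2 ⟨h ▸ hxe, y, hy, h.symm⟩)⟩
    · exact Or.inl ⟨x.toList, (pvMemFiltered a _).2 ⟨hxe, x, hx, rfl⟩,
        Or.inr ⟨y.toList, (pvMemFiltered b _).2 ⟨hye, y, hy, rfl⟩, h⟩⟩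
    · exact Or.inr ⟨y.toList, (pvMemFiltered b _).2 ⟨hye, y, hy, rfl⟩,
        Or.inr ⟨x.toList, (pvMemFiltered a _).2 ⟨hxe, x, hx, rfl⟩, h⟩⟩

-- ===== VERDICT (by name: the statement is the Claim_ definition above) =====
theorem locks_conflict_py_spec : Claim_equal_locks_conflict_py := by
  intro a b _
  unfold Spec_locks_conflict_py
  rw [Bool.eq_iff_iff, pvA_iff, pvB_iff]
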